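-- pv_equiv track=rewrite | github.com/yiqichen-2000/BERTE | Kmer_pre-processing/seq_to_kmercount_horner.py | number_to_sequence
-- ===== SOURCE A (Python) =====
-- def number_to_sequence(number,k):
--     """ Convert number to nucleotide sequence based on given k-mer length """
--     bases = ['A', 'C', 'G', 'T']
--     sequence = ''
--     while number > 0:
--         sequence = bases[number % 4] + sequence
--         number //= 4
--     while len(sequence) < k:
--         sequence = 'A' + sequence
--     return sequence
-- ===== SOURCE B (Python) =====
-- def number_to_sequence(number, k):
--     """Convert number to nucleotide sequence based on given k-mer length."""
--     bases = 'ACGT'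
--     n = number if number > 0 else 0
--     # number of base-4 digits of n (0 for n == 0)
--     d = 0
--     t = n
--     while t > 0:
--         d += 1
--         t //= 4
--     L = max(d, k)
--     return 'A' * (L - d) + ''.join(bases[(n // 4 ** i) % 4] for i in range(d - 1, -1, -1))
-- ===== Notes on version B (the rewrite author's own statement) =====
-- stated objective: faster
-- what changed: Replaces A's two while-loops (Horner digit-peeling that prepends characters one at a time, then a character-by-character padding loop) by a direct construction: count the base-4 digits d, take L = max(d, k), emit the 'A'-padding as one string repetition and extract each real digit MSB-first via (n // 4**i) % 4, joining once.
import Mathlib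
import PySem

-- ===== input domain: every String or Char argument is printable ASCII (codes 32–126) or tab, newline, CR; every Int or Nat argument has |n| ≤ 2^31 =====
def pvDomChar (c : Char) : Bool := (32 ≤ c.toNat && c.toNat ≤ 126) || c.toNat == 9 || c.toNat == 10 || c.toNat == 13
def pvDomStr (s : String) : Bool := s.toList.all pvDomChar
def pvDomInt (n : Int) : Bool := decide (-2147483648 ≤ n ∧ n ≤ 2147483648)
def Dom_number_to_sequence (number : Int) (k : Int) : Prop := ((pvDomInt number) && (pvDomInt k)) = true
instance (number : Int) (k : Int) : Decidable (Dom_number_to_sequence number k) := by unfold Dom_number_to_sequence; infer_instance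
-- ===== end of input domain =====

-- B counts the base-4 digits, emits the 'A'-padding as one repetition and extracts the real
-- digits MSB-first by positional division, instead of A's Horner prepend loop plus a
-- character-by-character padding loop; measurably faster on large k (no quadratic prepending).


-- ===== PORT A =====
def pvBases : List Char := ['A', 'C', 'G', 'T']

-- 'while number > 0: sequence = bases[number % 4] + sequence; number //= 4'
def pvALoop (number : Int) (seq : List Char) : List Char :=
  if h : number > 0 then
    pvALoop (PySem.Int.floordiv number 4)
      (((PySem.List.pyGet? pvBases (PySem.Int.mod number 4)).getD ' ') :: seq)
  else seq
termination_by number.toNat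
decreasing_by
  rw [PySem.Int.floordiv_eq_ediv_of_pos (by norm_num)]
  omega

-- 'while len(sequence) < k: sequence = "A" + sequence'
def pvPad (seq : List Char) (k : Int) : List Char :=
  if h : (seq.length : Int) < k then pvPad ('A' :: seq) k else seq
termination_by (k - seq.length).toNat
decreasing_by
  simp only [List.length_cons]
  omega

def number_to_sequence (number : Int) (k : Int) : String :=
  String.mk (pvPad (pvALoop number []) k)

-- ===== PORT B =====
-- 'd = 0; t = n; while t > 0: d += 1; t //= 4'
def pvCount (t : Int) (d : Int) : Int :=
  if h : t > 0 then pvCount (PySem.Int.floordiv t 4) (d + 1) else d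
termination_by t.toNat
decreasing_by
  rw [PySem.Int.floordiv_eq_ediv_of_pos (by norm_num)]
  omega

def number_to_sequence_alt (number : Int) (k : Int) : String :=
  let n : Int := if number > 0 then number else 0
  let d : Int := pvCount n 0
  let L : Int := max d k
  String.mk (PySem.List.pyRepeat ['A'] (L - d) ++
    (PySem.List.pyRange (d - 1) (-1) (-1)).map (fun i =>
      (PySem.List.pyGet? pvBases
        (PySem.Int.mod (PySem.Int.floordiv n ((4 : Int) ^ i.toNat)) 4)).getD ' '))

-- ===== PRECONDITION & SPEC =====
def Spec_number_to_sequence (number : Int) (k : Int) (out : String) : Prop := out = number_to_sequence_alt number k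
instance (number : Int) (k : Int) (out : String) : Decidable (Spec_number_to_sequence number k out) := by unfold Spec_number_to_sequence; infer_instance

-- ===== CLAIM (what is proved, stated in full; the proofs are below) =====
def Claim_equal_number_to_sequence : Prop := ∀ (number : Int) (k : Int), Dom_number_to_sequence number k → Spec_number_to_sequence number k (number_to_sequence number k)

-- ===== LEMMAS AND PROOFS =====

-- digit character for a base-4 digit r (used canonically on both sides)
def pvCh (r : Nat) : Char := (PySem.List.pyGet? pvBases (r : Int)).getD ' '

-- canonical MSB-first base-4 digit string of a natural number
def pvNatDigits (n : Nat) : List Char :=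
  if h : n = 0 then [] else pvNatDigits (n / 4) ++ [pvCh (n % 4)]
termination_by n
decreasing_by exact Nat.div_lt_self (Nat.pos_of_ne_zero h) (by norm_num)

-- number of base-4 digits
def pvNdc (n : Nat) : Nat :=
  if h : n = 0 then 0 else pvNdc (n / 4) + 1
termination_by n
decreasing_by exact Nat.div_lt_self (Nat.pos_of_ne_zero h) (by norm_num)

theorem pvALoop_eq (number : Int) (seq : List Char) :
    pvALoop number seq = pvNatDigits number.toNat ++ seq := by
  rw [pvALoop]
  split_ifs with h
  · have hc : number = ((number.toNat : Nat) : Int) := by omega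
    have hfd : PySem.Int.floordiv number 4 = ((number.toNat / 4 : Nat) : Int) := by
      rw [hc]; exact_mod_cast PySem.Int.floordiv_natCast number.toNat 4
    have hmd : PySem.Int.mod number 4 = ((number.toNat % 4 : Nat) : Int) := by
      rw [hc]; exact_mod_cast PySem.Int.mod_natCast number.toNat 4
    rw [hfd, hmd, pvALoop_eq]
    simp only [Int.toNat_natCast]
    conv_rhs => rw [pvNatDigits, dif_neg (show ¬ number.toNat = 0 by omega)]
    simp [pvCh]
  · have h0 : number.toNat = 0 := by omega
    rw [h0, pvNatDigits]; simp
termination_by number.toNat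
decreasing_by
  simp only [Int.toNat_natCast]; omega

theorem pvPad_eq (seq : List Char) (k : Int) :
    pvPad seq k = List.replicate (k - seq.length).toNat 'A' ++ seq := by
  rw [pvPad]
  split_ifs with h
  · rw [pvPad_eq]
    have h1 : (k - ((('A' :: seq).length : Nat) : Int)).toNat + 1 = (k - seq.length).toNat := by
      simp only [List.length_cons]; omega
    rw [← h1, List.replicate_succ']
    simp
  · have h0 : (k - seq.length).toNat = 0 := by omega
    rw [h0]; simp
termination_by (k - seq.length).toNat
decreasing_by
  simp only [List.length_cons]; omega

theorem pvCount_eq (t : Int) (d : Int) :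
    pvCount t d = d + (pvNdc t.toNat : Int) := by
  rw [pvCount]
  split_ifs with h
  · have hc : t = ((t.toNat : Nat) : Int) := by omega
    have hfd : PySem.Int.floordiv t 4 = ((t.toNat / 4 : Nat) : Int) := by
      rw [hc]; exact_mod_cast PySem.Int.floordiv_natCast t.toNat 4
    rw [hfd, pvCount_eq]
    simp only [Int.toNat_natCast]
    conv_rhs => rw [pvNdc, dif_neg (show ¬ t.toNat = 0 by omega)]
    push_cast; ring
  · have h0 : t.toNat = 0 := by omega
    rw [h0, pvNdc]; simp
termination_by t.toNat
decreasing_by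
  simp only [Int.toNat_natCast]; omega

theorem pvNatDigits_length (n : Nat) : (pvNatDigits n).length = pvNdc n := by
  rw [pvNatDigits, pvNdc]
  split_ifs with h
  · rfl
  · simp [pvNatDigits_length (n / 4)]
termination_by n
decreasing_by exact Nat.div_lt_self (Nat.pos_of_ne_zero h) (by norm_num)

theorem pvRow_exact (n : Nat) :
    (List.range (pvNdc n)).reverse.map (fun i => pvCh (n / 4 ^ i % 4)) = pvNatDigits n := by
  rw [pvNdc, pvNatDigits]
  split_ifs with h
  · simp
  · rw [List.range_succ_eq_map, List.reverse_cons, List.map_append, List.map_reverse,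
      List.map_map]
    have hmap : ((List.range (pvNdc (n / 4))).map
        ((fun i => pvCh (n / 4 ^ i % 4)) ∘ Nat.succ)).reverse =
        (List.range (pvNdc (n / 4))).reverse.map (fun i => pvCh (n / 4 / 4 ^ i % 4)) := by
      rw [← List.map_reverse]
      apply List.map_congr_left
      intro i _
      simp only [Function.comp_apply]
      congr 1
      rw [pow_succ, Nat.div_div_eq_div_mul, Nat.mul_comm]
    rw [hmap, pvRow_exact (n / 4)]
    simp [pvCh]
termination_by n
decreasing_by exact Nat.div_lt_self (Nat.pos_of_ne_zero h) (by norm_num)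

theorem pvRange_down_map (L : Int) (F : Int → Char) :
    (PySem.List.pyRange (L - 1) (-1) (-1)).map F =
      (List.range L.toNat).reverse.map (fun i : Nat => F i) := by
  rw [PySem.List.pyRange_neg_one_eq_reverse]
  rw [show (-1 : Int) + 1 = 0 by ring, show L - 1 + 1 = L by ring]
  rw [PySem.List.pyRange_one, show L - 0 = L by ring]
  rw [← List.map_reverse, List.map_map, List.map_reverse, List.map_reverse]
  congr 1
  apply List.map_congr_left
  intro i _
  simp

-- ===== VERDICT (by name: the statement is the Claim_ definition above) =====
theorem number_to_sequence_spec : Claim_equal_number_to_sequence := by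
  intro number k _
  unfold Spec_number_to_sequence number_to_sequence number_to_sequence_alt
  have hn : (if number > 0 then number else 0) = ((number.toNat : Nat) : Int) := by
    split_ifs <;> omega
  simp only [hn]
  rw [pvALoop_eq, List.append_nil, pvPad_eq, pvNatDigits_length, pvCount_eq]
  simp only [Int.toNat_natCast, zero_add]
  generalize number.toNat = m
  rw [pvRange_down_map]
  have hcongr : (List.range ((pvNdc m : Nat) : Int).toNat).reverse.map
      (fun i : Nat => (fun i : Int => (PySem.List.pyGet? pvBases
          (PySem.Int.mod (PySem.Int.floordiv ((m : Nat) : Int) ((4 : Int) ^ i.toNat)) 4)).getD ' ') (i : Int)) =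
      (List.range ((pvNdc m : Nat) : Int).toNat).reverse.map (fun i : Nat => pvCh (m / 4 ^ i % 4)) := by
    apply List.map_congr_left
    intro i _
    simp only [Int.toNat_natCast]
    rw [show (4 : Int) ^ i = ((4 ^ i : Nat) : Int) by push_cast; ring]
    rw [PySem.Int.floordiv_natCast m (4 ^ i)]
    rw [show PySem.Int.mod ((m / 4 ^ i : Nat) : Int) 4 = ((m / 4 ^ i % 4 : Nat) : Int) by
      exact_mod_cast PySem.Int.mod_natCast (m / 4 ^ i) 4]
    rfl
  rw [hcongr]
  simp only [Int.toNat_natCast]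
  rw [pvRow_exact m, PySem.List.pyRepeat_singleton]
  have hc : (k - ((pvNdc m : Nat) : Int)).toNat =
      (max ((pvNdc m : Nat) : Int) k - ((pvNdc m : Nat) : Int)).toNat := by
    rcases max_cases ((pvNdc m : Nat) : Int) k with ⟨h1, h2⟩ | ⟨h1, h2⟩ <;> rw [h1] <;> omega
  rw [hc]
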